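-- pv_equiv track=rewrite | github.com/LukaszMalucha/PDF-Parsing | Workshop/pdf_parser/html_to_text.py | sort_strings
-- ===== SOURCE A (Python) =====
-- import operator
--
-- def sort_strings(l):
--     """Group strings by their page location in order to keep row together"""
--     sorted_strings = {}
--     for string in l:
--         if string[0] not in sorted_strings:
--             sorted_strings[string[0]] = []
--         sorted_strings[string[0]].append(string[1])
--
--
--     sorted_values = sorted(sorted_strings.items(), key=operator.itemgetter(0))
--
--     sorts = []
--     for element in sorted_values:
--         sorts.append(list(reversed(element[1])))
--
--
--     # REMOVE TABLE STRINGS AND REPLACE THEM WITH "TABLE ROW" Message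
--     sorted_string_list = []
--     for element in sorts:
--         if len(element) > 1:
--             sorted_string_list.append("TABLE ROW")
--         else:
--             sorted_string_list.append(element[0])
--
--     return sorted_string_list
-- ===== SOURCE B (Python) =====
-- import operator
-- import itertools
--
-- def sort_strings(l):
--     """Group strings by their page location in order to keep row together"""
--     s = sorted(l, key=operator.itemgetter(0))
--     result = []
--     for _, group in itertools.groupby(s, key=operator.itemgetter(0)):
--         vals = [x[1] for x in group]
--         result.append("TABLE ROW" if len(vals) > 1 else vals[0])
--     return result
-- ===== Notes on version B (the rewrite author's own statement) =====
-- stated objective: idiomatic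
-- what changed: Replaces the dict-based grouping plus key-sort plus per-group reversal passes with a single sort-then-itertools.groupby pipeline over the list itself.
import Mathlib
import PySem

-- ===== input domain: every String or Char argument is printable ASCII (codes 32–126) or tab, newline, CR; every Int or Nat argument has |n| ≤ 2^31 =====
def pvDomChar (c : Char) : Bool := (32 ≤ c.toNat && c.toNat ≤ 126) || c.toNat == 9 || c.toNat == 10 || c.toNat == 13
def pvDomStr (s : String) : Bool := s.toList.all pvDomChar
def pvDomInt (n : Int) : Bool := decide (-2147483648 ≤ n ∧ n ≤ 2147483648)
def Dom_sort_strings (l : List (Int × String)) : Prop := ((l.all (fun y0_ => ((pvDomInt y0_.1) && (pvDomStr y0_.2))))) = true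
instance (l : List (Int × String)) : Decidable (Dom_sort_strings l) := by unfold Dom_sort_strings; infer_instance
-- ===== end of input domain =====

-- B replaces A's dict-grouping, key-sort and per-group reversal passes with a single
-- sort-then-groupby pipeline (same return value; no speed claim).

-- ===== PORT A =====
def sort_strings (l : List (Int × String)) : List String :=
  let sorted_strings := l.foldl (fun d string =>
    let d := if d.contains string.1 = false then d.insert string.1 ([] : List String) else d
    d.modify string.1 [] (fun v => v ++ [string.2])) PySem.Dict.empty
  let sorted_values := PySem.List.sorted sorted_strings.items (fun p => p.1) false
  let sorts := sorted_values.foldl (fun acc element => acc ++ [element.2.reverse]) []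
  sorts.foldl (fun acc element =>
    acc ++ [if 1 < element.length then "TABLE ROW" else PySem.List.pyGetD element 0 ""]) []

-- ===== PORT B =====
-- itertools.groupby: group consecutive pairs with equal first component (structural recursion)
def pvGroupBy : List (Int × String) → List (Int × List String)
  | [] => []
  | (k, v) :: rest =>
    match pvGroupBy rest with
    | [] => [(k, [v])]
    | (k', vs) :: gs => if k == k' then (k, v :: vs) :: gs else (k, [v]) :: (k', vs) :: gs

def sort_strings_alt (l : List (Int × String)) : List String :=
  let s := PySem.List.sorted l (fun p => p.1) false
  (pvGroupBy s).map (fun g => if 1 < g.2.length then "TABLE ROW" else PySem.List.pyGetD g.2 0 "")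

-- ===== PRECONDITION & SPEC =====
def Spec_sort_strings (l : List (Int × String)) (out : List String) : Prop := out = sort_strings_alt l
instance (l : List (Int × String)) (out : List String) : Decidable (Spec_sort_strings l out) := by unfold Spec_sort_strings; infer_instance

-- ===== CLAIM (what is proved, stated in full; the proofs are below) =====
def Claim_equal_sort_strings : Prop := ∀ (l : List (Int × String)), Dom_sort_strings l → Spec_sort_strings l (sort_strings l)

-- ===== LEMMAS AND PROOFS =====

-- the strings grouped under key k, in l's order
def pvVals (l : List (Int × String)) (k : Int) : List String :=
  (l.filter (fun p => p.1 == k)).map (fun p => p.2)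

-- the final per-group value
def pvF (vs : List String) : String :=
  if 1 < vs.length then "TABLE ROW" else PySem.List.pyGetD vs 0 ""

-- the canonical result both ports are proved equal to
def pvCanon (l : List (Int × String)) : List String :=
  (PySem.List.sorted (PySem.Set.ofList (l.map (fun p => p.1))) (fun x => x) false).map
    (fun k => pvF (pvVals l k))

-- the distinct keys of the consecutive groups, same recursion as pvGroupBy
def pvKeys : List (Int × String) → List Int
  | [] => []
  | (k, _) :: rest =>
    match pvKeys rest with
    | [] => [k]
    | k' :: ks => if k == k' then k' :: ks else k :: k' :: ks

theorem pvF_perm {vs ws : List String} (h : vs.Perm ws) : pvF vs = pvF ws := by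
  unfold pvF
  have hl := h.length_eq
  match vs, ws with
  | [], [] => rfl
  | [a], [b] => simp_all
  | a :: a' :: vs, b :: b' :: ws => simp
  | [], _ :: _ | _ :: _, [] | [_], _ :: _ :: _ | _ :: _ :: _, [_] => simp at hl

theorem pvVals_cons_ne (k j : Int) (v : String) (rest : List (Int × String)) (h : j ≠ k) :
    pvVals ((k, v) :: rest) j = pvVals rest j := by
  simp [pvVals, Ne.symm h]

theorem mem_pvKeys {x : Int} {s : List (Int × String)} :
    x ∈ pvKeys s ↔ x ∈ s.map (fun p => p.1) := by
  induction s with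
  | nil => simp [pvKeys]
  | cons p rest ih =>
    obtain ⟨k, v⟩ := p
    simp only [pvKeys]
    cases hks : pvKeys rest with
    | nil => simp [hks ▸ ih]
    | cons k' ks =>
      by_cases hkk : k = k'
      · simp [hkk, ← ih, hks]
      · have : (k == k') = false := by simp [hkk]
        simp [this, ← ih, hks]

theorem pvKeys_cons (k : Int) (v : String) (rest : List (Int × String)) :
    ∃ ks, pvKeys ((k, v) :: rest) = k :: ks := by
  simp only [pvKeys]
  cases hks : pvKeys rest with
  | nil => exact ⟨[], rfl⟩
  | cons k' ks =>
    by_cases hkk : k = k'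
    · exact ⟨ks, by simp [hkk]⟩
    · have : (k == k') = false := by simp [hkk]
      exact ⟨k' :: ks, by simp [this]⟩

theorem pvKeys_pairwise {s : List (Int × String)}
    (h : s.Pairwise (fun a b => a.1 ≤ b.1)) : (pvKeys s).Pairwise (· < ·) := by
  induction s with
  | nil => simp [pvKeys]
  | cons p rest ih =>
    obtain ⟨k, v⟩ := p
    rw [List.pairwise_cons] at h
    have hle : ∀ x ∈ pvKeys rest, k ≤ x := by
      intro x hx
      rw [mem_pvKeys] at hx
      obtain ⟨q, hq, rfl⟩ := List.mem_map.mp hx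
      exact h.1 q hq
    have ihp := ih h.2
    simp only [pvKeys]
    cases hks : pvKeys rest with
    | nil => simp
    | cons k' ks =>
      by_cases hkk : k = k'
      · simp [hkk, hks ▸ ihp]
      · have hb : (k == k') = false := by simp [hkk]
        simp only [hb, Bool.false_eq_true, if_false]
        refine List.Pairwise.cons ?_ (hks ▸ ihp)
        intro x hx
        rcases List.mem_cons.mp hx with rfl | hx'
        · exact lt_of_le_of_ne (hle x (hks ▸ List.mem_cons_self)) hkk
        · have h1 : k ≤ k' := hle k' (hks ▸ List.mem_cons_self)
          have h2 : k' < x := (List.pairwise_cons.mp (hks ▸ ihp)).1 x hx'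
          omega

theorem pvGroupBy_eq {s : List (Int × String)}
    (h : s.Pairwise (fun a b => a.1 ≤ b.1)) :
    pvGroupBy s = (pvKeys s).map (fun k => (k, pvVals s k)) := by
  induction s with
  | nil => simp [pvGroupBy, pvKeys]
  | cons p rest ih =>
    obtain ⟨k, v⟩ := p
    rw [List.pairwise_cons] at h
    have hle : ∀ x ∈ pvKeys rest, k ≤ x := by
      intro x hx
      rw [mem_pvKeys] at hx
      obtain ⟨q, hq, rfl⟩ := List.mem_map.mp hx
      exact h.1 q hq
    have ihg := ih h.2
    have hpw := pvKeys_pairwise h.2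
    simp only [pvGroupBy, pvKeys, ihg]
    cases hks : pvKeys rest with
    | nil =>
      have hrest : rest = [] := by
        cases rest with
        | nil => rfl
        | cons q r =>
          obtain ⟨ks, hk⟩ := pvKeys_cons q.1 q.2 r
          simp at hk
          rw [hk] at hks; simp at hks
      subst hrest
      simp [pvVals]
    | cons k' ks =>
      rw [hks] at hpw
      have hkmem : ∀ j ∈ ks, k' < j := (List.pairwise_cons.mp hpw).1
      have hlek' : k ≤ k' := hle k' (hks ▸ List.mem_cons_self)
      simp only [List.map_cons]
      by_cases hkk : k = k'
      · subst hkk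
        have hb : (k == k) = true := by simp
        simp only [hb, if_true]
        congr 1
        · simp [pvVals]
        · apply List.map_congr_left
          intro j hj
          have hne : j ≠ k := by have := hkmem j hj; omega
          congr 1
          exact (pvVals_cons_ne k j v rest hne).symm
      · have hb : (k == k') = false := by simp [hkk]
        simp only [hb, Bool.false_eq_true, if_false]
        have hknot : ∀ q ∈ rest, q.1 ≠ k := by
          intro q hq hqk
          have : k ∈ pvKeys rest := mem_pvKeys.mpr (List.mem_map.mpr ⟨q, hq, hqk⟩)
          rw [hks] at this
          rcases List.mem_cons.mp this with rfl | h2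
          · exact hkk rfl
          · have := hkmem k h2; omega
        congr 1
        · simp [pvVals]
          intro a b hab hak; exact hknot (a, b) hab hak
        · congr 1
          · congr 1
            exact (pvVals_cons_ne k k' v rest (Ne.symm hkk)).symm
          · apply List.map_congr_left
            intro j hj
            have hne : j ≠ k := by have := hkmem j hj; omega
            congr 1
            exact (pvVals_cons_ne k j v rest hne).symm

theorem pvKeys_eq_sorted {s : List (Int × String)}
    (h : s.Pairwise (fun a b => a.1 ≤ b.1)) :
    pvKeys s = PySem.List.sorted (PySem.Set.ofList (s.map (fun p => p.1))) (fun x => x) false := by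
  have hpw := pvKeys_pairwise h
  refine ((PySem.List.sorted_eq_of_perm_of_pairwise_lt _ _ (fun x => x) ?_ ?_).symm)
  · rw [List.perm_ext_iff_of_nodup (hpw.imp ne_of_lt) (PySem.Set.nodup_ofList _)]
    intro x
    rw [mem_pvKeys, PySem.Set.mem_ofList]
  · exact hpw

theorem ofList_perm {xs ys : List Int} (h : xs.Perm ys) :
    (PySem.Set.ofList xs).Perm (PySem.Set.ofList ys) := by
  rw [List.perm_ext_iff_of_nodup (PySem.Set.nodup_ofList _) (PySem.Set.nodup_ofList _)]
  intro x
  rw [PySem.Set.mem_ofList, PySem.Set.mem_ofList]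
  exact ⟨fun hx => h.mem_iff.mp hx, fun hx => h.mem_iff.mpr hx⟩

theorem alt_eq_canon (l : List (Int × String)) : sort_strings_alt l = pvCanon l := by
  show (pvGroupBy (PySem.List.sorted l (fun p => p.1) false)).map
      (fun g => if 1 < g.2.length then "TABLE ROW" else PySem.List.pyGetD g.2 0 "") = pvCanon l
  set s := PySem.List.sorted l (fun p => p.1) false with hs
  have hpw : s.Pairwise (fun a b => a.1 ≤ b.1) := PySem.List.sorted_pairwise l (fun p => p.1)
  have hperm : s.Perm l := PySem.List.sorted_perm l (fun p => p.1) false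
  rw [pvGroupBy_eq hpw, pvKeys_eq_sorted hpw, pvCanon]
  have hsortkeys :
      PySem.List.sorted (PySem.Set.ofList (s.map (fun p => p.1))) (fun x => x) false
        = PySem.List.sorted (PySem.Set.ofList (l.map (fun p => p.1))) (fun x => x) false := by
    exact PySem.List.sorted_eq_sorted_of_perm _ _ (fun x => x) (fun a b hab => hab)
      (ofList_perm (hperm.map (fun p => p.1)))
  rw [hsortkeys, List.map_map]
  apply List.map_congr_left
  intro k _
  simp only [Function.comp]
  show pvF (pvVals s k) = pvF (pvVals l k)
  exact pvF_perm ((hperm.filter _).map _)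

theorem a_eq_canon (l : List (Int × String)) : sort_strings l = pvCanon l := by
  unfold sort_strings
  have hstep : (fun (d : PySem.Dict Int (List String)) (string : Int × String) =>
      (if d.contains string.1 = false then d.insert string.1 ([] : List String) else d).modify
        string.1 [] (fun v => v ++ [string.2]))
      = fun d string => d.modify string.1 [] (fun v => v ++ [string.2]) := by
    funext d p
    by_cases h : d.contains p.1 = false
    · simp only [h, if_true, PySem.Dict.modify, PySem.Dict.getD_insert_self,
        PySem.Dict.insert_insert_self, PySem.Dict.getD_of_not_contains d ([] : List String) h]
    · simp [h]
  rw [hstep]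
  show (((PySem.List.sorted (List.foldl (fun d p => d.modify p.1 [] (fun v => v ++ [p.2]))
        PySem.Dict.empty l).items (fun p => p.1) false).foldl
          (fun acc element => acc ++ [element.2.reverse]) []).foldl
            (fun acc element =>
              acc ++ [if 1 < element.length then "TABLE ROW" else PySem.List.pyGetD element 0 ""]) [])
      = pvCanon l
  set d0 := l.foldl (fun d p => d.modify p.1 [] (fun v => v ++ [p.2])) PySem.Dict.empty with hd0
  have hnodup : d0.keys.Nodup := by
    apply PySem.Dict.nodup_keys_foldl_modify_key
    exact PySem.Dict.nodup_keys_empty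
  have hget : ∀ c, d0.getD c [] = pvVals l c := by
    intro c
    rw [hd0, PySem.Dict.getD_foldl_modify_append, PySem.Dict.getD_empty]
    rfl
  have hkeys : d0.keys = PySem.Set.ofList (l.map (fun p => p.1)) := by
    rw [hd0, PySem.Dict.keys_foldl_modify_key, PySem.Dict.keys_empty]
    rfl
  have hitems : d0.items = (PySem.Set.ofList (l.map (fun p => p.1))).map
      (fun k => (k, pvVals l k)) := by
    rw [PySem.Dict.items_eq_map_keys d0 hnodup ([] : List String), hkeys]
    apply List.map_congr_left
    intro k _
    rw [hget]
  have hsorted : PySem.List.sorted d0.items (fun p => p.1) false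
      = (PySem.List.sorted (PySem.Set.ofList (l.map (fun p => p.1))) (fun x => x) false).map
          (fun k => (k, pvVals l k)) := by
    apply PySem.List.sorted_eq_of_perm_of_pairwise_lt
    · rw [hitems]
      exact (PySem.List.sorted_perm _ _ false).map _
    · rw [List.pairwise_map]
      exact PySem.List.sorted_ofList_pairwise_lt _
  rw [hsorted]
  rw [PySem.List.foldl_append_singleton_eq_map, PySem.List.foldl_append_singleton_eq_map]
  simp only [List.nil_append, List.map_map]
  apply List.map_congr_left
  intro k _
  show pvF (pvVals l k).reverse = pvF (pvVals l k)
  exact pvF_perm (List.reverse_perm _)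

-- ===== VERDICT (by name: the statement is the Claim_ definition above) =====
theorem sort_strings_spec : Claim_equal_sort_strings := by
  intro l _
  unfold Spec_sort_strings
  rw [a_eq_canon, alt_eq_canon]
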